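-- pv_equiv track=rewrite | github.com/lnilya/harley | src/py/modules/ColocCellsUtil/colocdatatypes.py | __getFociFromCellNum
-- ===== SOURCE A (Python) =====
-- from typing import List, Tuple
--
-- def __getFociFromCellNum(cellNums:List[int]):
--     curNum = 0
--     res = []
--     for i,cn in enumerate(cellNums):
--         if i > 0:
--             if cn == cellNums[i - 1]: curNum += 1
--             elif cn != cellNums[i - 1]: curNum = 0
--
--         res += [curNum]
--
--     return res
-- ===== SOURCE B (Python) =====
-- def __getFociFromCellNum(cellNums):
--     # Run-length decomposition: for each maximal run of equal values of
--     # length L, emit 0,1,...,L-1.  No running counter or prev-element compare.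
--     res = []
--     i, n = 0, len(cellNums)
--     while i < n:
--         j = i
--         while j < n and cellNums[j] == cellNums[i]:
--             j += 1
--         res.extend(range(j - i))
--         i = j
--     return res
-- ===== Notes on version B (the rewrite author's own statement) =====
-- stated objective: alternative
-- what changed: Replaces the index-based previous-element comparison with a mutable running counter by a two-pointer run-length decomposition that emits range(L) for each maximal run of equal values.
import Mathlib
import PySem

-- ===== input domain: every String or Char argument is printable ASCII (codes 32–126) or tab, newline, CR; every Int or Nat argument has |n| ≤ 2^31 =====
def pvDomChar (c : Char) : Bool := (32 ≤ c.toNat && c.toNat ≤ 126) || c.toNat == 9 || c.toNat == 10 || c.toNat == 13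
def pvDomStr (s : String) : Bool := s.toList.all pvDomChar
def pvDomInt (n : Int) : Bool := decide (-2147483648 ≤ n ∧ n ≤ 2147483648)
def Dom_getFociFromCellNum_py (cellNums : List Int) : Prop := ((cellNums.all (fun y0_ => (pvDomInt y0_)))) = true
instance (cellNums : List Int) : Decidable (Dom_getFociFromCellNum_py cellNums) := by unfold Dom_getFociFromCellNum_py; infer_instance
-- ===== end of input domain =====

-- B replaces A's index-based previous-element comparison with a running counter
-- by a run-length decomposition emitting range(L) per maximal run (alternative
-- decomposition, same O(n) cost).

-- ===== PORT A =====
-- loop body of A; cellNums[i-1] is always in range when i > 0, so pyGetD's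
-- default is never consulted (exact there)
def stepA (cellNums : List Int) (st : Int × List Int) (p : Int × Int) : Int × List Int :=
  let curNum :=
    if p.1 > 0 then
      (if p.2 = PySem.List.pyGetD cellNums (p.1 - 1) 0 then st.1 + 1
       else if p.2 ≠ PySem.List.pyGetD cellNums (p.1 - 1) 0 then 0 else st.1)
    else st.1
  (curNum, st.2 ++ [curNum])

def getFociFromCellNum_py (cellNums : List Int) : List Int :=
  ((PySem.List.enumerate cellNums 0).foldl (stepA cellNums) (0, [])).2

-- ===== PORT B =====
-- inner while loop of Source B: length of the maximal run of x's, and the rest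
def takeRun (x : Int) : List Int → Nat × List Int
  | [] => (0, [])
  | y :: ys => if y = x then ((takeRun x ys).1 + 1, (takeRun x ys).2) else (0, y :: ys)

theorem takeRun_len (x : Int) (xs : List Int) : (takeRun x xs).2.length ≤ xs.length := by
  induction xs with
  | nil => simp [takeRun]
  | cons y ys ih =>
    simp only [takeRun]
    split
    · exact le_trans ih (by simp)
    · simp

-- outer while loop of Source B: lengths j - i of the maximal runs
def runLens : List Int → List Nat
  | [] => []
  | x :: xs => ((takeRun x xs).1 + 1) :: runLens (takeRun x xs).2
termination_by xs => xs.length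
decreasing_by exact Nat.lt_succ_of_le (takeRun_len _ _)

def getFociFromCellNum_py_alt (cellNums : List Int) : List Int :=
  (runLens cellNums).flatMap (fun L => (List.range L).map Int.ofNat)

-- ===== PRECONDITION & SPEC =====
def Spec_getFociFromCellNum_py (cellNums : List Int) (out : List Int) : Prop := out = getFociFromCellNum_py_alt cellNums
instance (cellNums : List Int) (out : List Int) : Decidable (Spec_getFociFromCellNum_py cellNums out) := by unfold Spec_getFociFromCellNum_py; infer_instance

-- ===== CLAIM (what is proved, stated in full; the proofs are below) =====
def Claim_equal_getFociFromCellNum_py : Prop := ∀ (cellNums : List Int), Dom_getFociFromCellNum_py cellNums → Spec_getFociFromCellNum_py cellNums (getFociFromCellNum_py cellNums)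

-- ===== LEMMAS AND PROOFS =====

-- reference recursion: value emitted for each element given previous element and counter
def go (prev cur : Int) : List Int → List Int
  | [] => []
  | x :: xs => (if x = prev then cur + 1 else 0) :: go x (if x = prev then cur + 1 else 0) xs

-- reference form both ports are reduced to
def ref : List Int → List Int
  | [] => []
  | x :: xs => 0 :: go x 0 xs

theorem foldA_aux (full : List Int) (rest : List Int) :
    ∀ (k : Nat) (prev cur : Int) (res : List Int), full.drop k = prev :: rest →
    ((PySem.List.enumerate rest ((k : Int) + 1)).foldl (stepA full) (cur, res)).2
      = res ++ go prev cur rest := by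
  induction rest with
  | nil => intro k prev cur res _; simp [PySem.List.enumerate_nil, go]
  | cons r0 rest' ih =>
    intro k prev cur res hdrop
    have hget : PySem.List.pyGetD full ((k : Int) + 1 - 1) 0 = prev := by
      have h0 : full[k]? = some prev := by
        have h : (full.drop k)[0]? = full[k + 0]? := List.getElem?_drop
        rw [hdrop] at h
        simpa using h.symm
      have : ((k : Int) + 1 - 1) = ((k : Nat) : Int) := by ring
      rw [this, PySem.List.pyGetD_natCast]
      simp [List.getD, h0]
    have hdrop' : full.drop (k + 1) = r0 :: rest' := by
      have : full.drop (k + 1) = (full.drop k).drop 1 := by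
        rw [List.drop_drop]
      rw [this, hdrop]
      simp
    have ihk := ih (k + 1) r0 (if r0 = prev then cur + 1 else 0) (res ++ [if r0 = prev then cur + 1 else 0]) hdrop'
    rw [PySem.List.enumerate_cons]
    simp only [List.foldl_cons]
    have hstep : stepA full (cur, res) ((k : Int) + 1, r0)
        = (if r0 = prev then cur + 1 else 0, res ++ [if r0 = prev then cur + 1 else 0]) := by
      simp only [stepA, hget]
      have hpos : ((k : Int) + 1) > 0 := by positivity
      by_cases h : r0 = prev <;> simp [hpos, h]
    rw [hstep]
    have hcast : ((k : Int) + 1 + 1) = (((k + 1 : Nat) : Int) + 1) := by push_cast; ring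
    rw [hcast, ihk]
    simp [go]

theorem portA_eq_ref (cellNums : List Int) : getFociFromCellNum_py cellNums = ref cellNums := by
  cases cellNums with
  | nil => rfl
  | cons x xs =>
    unfold getFociFromCellNum_py
    rw [PySem.List.enumerate_cons]
    simp only [List.foldl_cons]
    have hstep : stepA (x :: xs) (0, []) (0, x) = (0, [0]) := by
      simp [stepA]
    rw [hstep]
    have := foldA_aux (x :: xs) xs 0 x 0 [0] (by simp)
    simp only [Nat.cast_zero, zero_add] at this
    simp only [zero_add]
    rw [this]
    simp [ref]

theorem go_run (x : Int) (xs : List Int) : ∀ (c : Int),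
    go x c xs = ((List.range (takeRun x xs).1).map (fun (j : Nat) => c + 1 + (j : Int)))
      ++ ref (takeRun x xs).2 := by
  induction xs with
  | nil => intro c; simp [takeRun, go, ref]
  | cons y ys ih =>
    intro c
    by_cases h : y = x
    · subst h
      have hg : go y c (y :: ys) = (c + 1) :: go y (c + 1) ys := by simp [go]
      have ht1 : (takeRun y (y :: ys)).1 = (takeRun y ys).1 + 1 := by simp [takeRun]
      have ht2 : (takeRun y (y :: ys)).2 = (takeRun y ys).2 := by simp [takeRun]
      rw [hg, ht1, ht2, ih (c + 1), List.range_succ_eq_map]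
      simp only [List.map_cons, List.map_map, List.cons_append]
      congr 1
      · norm_num
      · congr 1
        apply List.map_congr_left
        intro j _
        simp
        ring
    · simp [takeRun, h, go, ref]

theorem portB_eq_ref (cellNums : List Int) : getFociFromCellNum_py_alt cellNums = ref cellNums := by
  match cellNums with
  | [] => simp [getFociFromCellNum_py_alt, runLens, ref]
  | x :: xs =>
    have ihr : getFociFromCellNum_py_alt (takeRun x xs).2 = ref (takeRun x xs).2 :=
      portB_eq_ref (takeRun x xs).2
    unfold getFociFromCellNum_py_alt at ihr ⊢
    rw [runLens]
    simp only [List.flatMap_cons]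
    rw [ihr]
    show _ = 0 :: go x 0 xs
    rw [go_run x xs 0, List.range_succ_eq_map]
    simp only [List.map_cons, List.map_map, List.cons_append]
    congr 1
    · simp
      omega
termination_by cellNums.length
decreasing_by exact Nat.lt_succ_of_le (takeRun_len _ _)

-- ===== VERDICT (by name: the statement is the Claim_ definition above) =====
theorem getFociFromCellNum_py_spec : Claim_equal_getFociFromCellNum_py := by
  intro cellNums _
  unfold Spec_getFociFromCellNum_py
  rw [portA_eq_ref, portB_eq_ref]
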